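-- pv_equiv track=rewrite | github.com/whitw/baekjoon | 17609.py | solve
-- ===== SOURCE A (Python) =====
-- def is_palindrome(s):
--     return s == s[::-1]
--
-- def solve(s):
--     idx_l = 0
--     idx_r = len(s) - 1
--     while(idx_l < idx_r):
--         if s[idx_l] == s[idx_r]:
--             idx_l += 1
--             idx_r -= 1
--         else:
--             if is_palindrome(s[:idx_l] + s[idx_l + 1:]) or is_palindrome(s[:idx_r] + s[idx_r + 1:]):
--                 return 1
--             else:
--                 return 2
--     return 0
-- ===== SOURCE B (Python) =====
-- def solve(s):
--     # exhaustive search: try deleting every single position instead of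
--     # analysing the first mismatched pair
--     if s == s[::-1]:
--         return 0
--     if any(s[:i] + s[i + 1:] == (s[:i] + s[i + 1:])[::-1] for i in range(len(s))):
--         return 1
--     return 2
-- ===== Notes on version B (the rewrite author's own statement) =====
-- stated objective: simpler
-- what changed: B replaces A's greedy two-pointer scan that tests deletion only at the first mismatched pair by a whole-string palindrome check followed by an exhaustive search over all single-character deletions; equivalence rests on the classical fact that if any one deletion yields a palindrome then deleting one end of the first mismatched pair does.
import Mathlib
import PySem

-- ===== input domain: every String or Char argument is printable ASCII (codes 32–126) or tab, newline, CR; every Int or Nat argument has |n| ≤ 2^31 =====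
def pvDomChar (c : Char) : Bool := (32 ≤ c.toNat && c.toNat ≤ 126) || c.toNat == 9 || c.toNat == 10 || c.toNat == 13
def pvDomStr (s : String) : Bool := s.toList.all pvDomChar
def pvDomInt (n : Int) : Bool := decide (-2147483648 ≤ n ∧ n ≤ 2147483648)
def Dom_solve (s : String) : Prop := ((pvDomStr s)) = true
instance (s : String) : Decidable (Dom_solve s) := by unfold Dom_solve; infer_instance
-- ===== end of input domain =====

-- B replaces A's greedy first-mismatch analysis by an exhaustive search over all
-- single-character deletions (objective: simpler; not faster in the worst case).

-- ===== PORT A =====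
-- is_palindrome(s): s == s[::-1]; s[::-1] is PySem.List.slice? … (-1) (step -1 ≠ 0, so never none)
def isPalA (t : List Char) : Bool :=
  match PySem.List.slice? t none none (-1) with
  | some r => t == r
  | none => false  -- unreachable: step -1 ≠ 0

-- the while loop of A; l, r are idx_l, idx_r
def loopA (cs : List Char) (l r : Int) : Int :=
  if h : l < r then
    match PySem.List.pyGet? cs l, PySem.List.pyGet? cs r with
    | some a, some b =>
      if a == b then loopA cs (l + 1) (r - 1)
      else if isPalA (PySem.List.slice cs none (some l) ++ PySem.List.slice cs (some (l + 1)) none)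
             || isPalA (PySem.List.slice cs none (some r) ++ PySem.List.slice cs (some (r + 1)) none)
           then 1 else 2
    | _, _ => 0  -- unreachable: from solve, 0 ≤ l < r ≤ len − 1 always holds
  else 0
termination_by (r - l).toNat
decreasing_by omega

def solve (s : String) : Int := loopA s.toList 0 ((s.toList.length : Int) - 1)

-- ===== PORT B =====
def solve_alt (s : String) : Int :=
  let cs := s.toList
  if cs == cs.reverse then 0  -- s == s[::-1]
  else if (List.range cs.length).any (fun i =>
      -- s[:i] + s[i+1:] == (s[:i] + s[i+1:])[::-1]
      let t := PySem.List.slice cs none (some (i : Int)) ++ PySem.List.slice cs (some ((i : Int) + 1)) none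
      t == t.reverse)
  then 1 else 2

-- ===== PRECONDITION & SPEC =====
def Spec_solve (s : String) (out : Int) : Prop := out = solve_alt s
instance (s : String) (out : Int) : Decidable (Spec_solve s out) := by unfold Spec_solve; infer_instance

-- ===== CLAIM =====
def Claim_equal_solve : Prop := ∀ (s : String), Dom_solve s → Spec_solve s (solve s)

-- ===== LEMMAS AND PROOFS =====

-- the string with the character at index i deleted
def delL (cs : List Char) (i : Nat) : List Char := cs.take i ++ cs.drop (i + 1)

lemma sliceDel (cs : List Char) (i : Nat) :
    PySem.List.slice cs none (some (i : Int)) ++ PySem.List.slice cs (some ((i : Int) + 1)) none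
      = delL cs i := by
  rw [show (i : Int) + 1 = ((i + 1 : Nat) : Int) from by push_cast; ring,
      PySem.List.slice_to_natCast, PySem.List.slice_from_natCast]
  rfl

lemma isPalA_eq (t : List Char) : isPalA t = (t == t.reverse) := by
  simp [isPalA, PySem.List.slice?_none_none_neg_one]

lemma delL_length (cs : List Char) (k : Nat) (hk : k < cs.length) :
    (delL cs k).length = cs.length - 1 := by
  simp [delL]; omega

lemma delL_getElem? (cs : List Char) (k j : Nat) (hk : k < cs.length) :
    (delL cs k)[j]? = if j < k then cs[j]? else cs[j + 1]? := by
  unfold delL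
  by_cases h : j < k
  · rw [if_pos h, List.getElem?_append_left (by simp; omega), List.getElem?_take_of_lt h]
  · rw [if_neg h, List.getElem?_append_right (by simp; omega), List.getElem?_drop]
    congr 1
    simp
    omega

lemma some_inj_get (cs : List Char) {i j : Nat} (h : cs[i]? = cs[j]?)
    (hi : i < cs.length) (hj : j < cs.length) : cs[i]'hi = cs[j]'hj := by
  rw [List.getElem?_eq_getElem hi, List.getElem?_eq_getElem hj] at h
  exact Option.some.inj h

lemma getElem?_inv_get (cs : List Char) {j : Nat}
    (inv : cs[j]? = cs[cs.length - 1 - j]?) (hj : j < cs.length) :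
    cs[j]'hj = cs[cs.length - 1 - j]'(by omega) :=
  some_inj_get cs inv hj (by omega)

lemma pal_iff (t : List Char) :
    t = t.reverse ↔ ∀ i, i < t.length → t[i]? = t[t.length - 1 - i]? := by
  constructor
  · intro h i hi
    conv_lhs => rw [h]
    rw [List.getElem?_reverse hi]
  · intro h
    apply List.ext_getElem?
    intro i
    by_cases hi : i < t.length
    · rw [List.getElem?_reverse hi]
      exact h i hi
    · rw [List.getElem?_eq_none (by omega), List.getElem?_eq_none (by simp; omega)]

lemma delL_succ_eq (cs : List Char) (a : Nat) (ha : a + 1 < cs.length)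
    (he : cs[a]'(by omega) = cs[a + 1]'ha) : delL cs a = delL cs (a + 1) := by
  unfold delL
  rw [List.take_add_one, List.drop_eq_getElem_cons ha,
      List.getElem?_eq_getElem (show a < cs.length by omega)]
  simp [he]

lemma delL_const (cs : List Char) (a b : Nat) (hab : a ≤ b) (hb : b < cs.length)
    (hc : ∀ j, a ≤ j → j < b → cs[j]? = cs[j + 1]?) :
    delL cs a = delL cs b := by
  induction b, hab using Nat.le_induction with
  | base => rfl
  | succ n hn ih =>
    rw [ih (by omega) (fun j h1 h2 => hc j h1 (by omega)),
        delL_succ_eq cs n hb (some_inj_get cs (hc n hn (by omega)) (by omega) (by omega))]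

-- the classical fact: if some single deletion yields a palindrome, so does a
-- deletion at the first mismatched pair (l, n-1-l)
lemma any_del_to_first (cs : List Char) (l k : Nat) (hn : 2 * l + 1 < cs.length)
    (inv : ∀ j, j < l → cs[j]? = cs[cs.length - 1 - j]?)
    (hne : cs[l]'(by omega) ≠ cs[cs.length - 1 - l]'(by omega))
    (hk : k < cs.length) (hp : delL cs k = (delL cs k).reverse) :
    delL cs l = (delL cs l).reverse ∨
      delL cs (cs.length - 1 - l) = (delL cs (cs.length - 1 - l)).reverse := by
  set n := cs.length with hndef
  set r := n - 1 - l with hrdef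
  have hpal := (pal_iff _).mp hp
  have hlen := delL_length cs k hk
  rw [hlen] at hpal
  by_cases hkl : k < l
  · -- k left of the mismatch: cs is constant on [k, l], so delL k = delL l
    left
    rw [← delL_const cs k l (by omega) (by omega) ?_]
    · exact hp
    · intro j h1 h2
      have h3 := hpal j (by omega)
      rw [show n - 1 - 1 - j = n - 2 - j from by omega,
          delL_getElem? cs k j hk, if_neg (by omega),
          delL_getElem? cs k (n - 2 - j) hk, if_neg (by omega),
          show n - 2 - j + 1 = n - 1 - j from by omega] at h3
      rw [h3, ← inv j h2]
  · by_cases hkr : k ≤ r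
    · -- inside the mismatched window
      by_cases hkl2 : k = l
      · left; rw [← hkl2]; exact hp
      · by_cases hkr2 : k = r
        · right; rw [← hkr2]; exact hp
        · -- strictly inside: the mismatched pair survives symmetrically, contradiction
          exfalso
          have h3 := hpal l (by omega)
          rw [show n - 1 - 1 - l = r - 1 from by omega,
              delL_getElem? cs k l hk, if_pos (by omega),
              delL_getElem? cs k (r - 1) hk, if_neg (by omega),
              show r - 1 + 1 = r from by omega] at h3
          exact hne (some_inj_get cs h3 (by omega) (by omega))
    · -- k right of the mismatch: cs is constant on [r, k], so delL k = delL r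
      right
      rw [delL_const cs r k (by omega) hk ?_]
      · exact hp
      · intro j h1 h2
        have h3 := hpal j (by omega)
        rw [show n - 1 - 1 - j = n - 2 - j from by omega,
            delL_getElem? cs k j hk, if_pos (by omega),
            delL_getElem? cs k (n - 2 - j) hk, if_pos (by omega)] at h3
        have h6 := inv (n - 2 - j) (by omega)
        rw [show n - 1 - (n - 2 - j) = j + 1 from by omega] at h6
        rw [h3, h6]

-- B's exhaustive condition agrees with A's first-mismatch condition
lemma key_cond (cs : List Char) (l : Nat) (hn : 2 * l + 1 < cs.length)
    (inv : ∀ j, j < l → cs[j]? = cs[cs.length - 1 - j]?)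
    (hne : cs[l]'(by omega) ≠ cs[cs.length - 1 - l]'(by omega)) :
    ((delL cs l == (delL cs l).reverse) || (delL cs (cs.length - 1 - l) == (delL cs (cs.length - 1 - l)).reverse))
      = (List.range cs.length).any (fun i => delL cs i == (delL cs i).reverse) := by
  apply Bool.coe_iff_coe.mp
  simp only [Bool.or_eq_true, beq_iff_eq, List.any_eq_true, List.mem_range]
  constructor
  · rintro (h | h)
    · exact ⟨l, by omega, h⟩
    · exact ⟨cs.length - 1 - l, by omega, h⟩
  · rintro ⟨k, hk, hp⟩
    exact any_del_to_first cs l k hn inv hne hk hp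

lemma matched_pal (cs : List Char) (l : Nat) (hn : cs.length ≤ 2 * l + 1)
    (inv : ∀ k, k < l → cs[k]? = cs[cs.length - 1 - k]?) : cs = cs.reverse := by
  apply List.ext_getElem?
  intro i
  by_cases hi : i < cs.length
  · rw [List.getElem?_reverse hi]
    by_cases h1 : i < l
    · exact inv i h1
    · by_cases h2 : cs.length - 1 - i < l
      · have := inv _ h2
        have h3 : cs.length - 1 - (cs.length - 1 - i) = i := by omega
        rw [h3] at this
        exact this.symm
      · have : i = cs.length - 1 - i := by omega
        rw [← this]
  · rw [List.getElem?_eq_none (by omega), List.getElem?_eq_none (by simp; omega)]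

lemma loopA_done (s : String) (l : Nat) (h : s.toList.length ≤ 2 * l + 1)
    (inv : ∀ j, j < l → s.toList[j]? = s.toList[s.toList.length - 1 - j]?) :
    loopA s.toList ↑l ((s.toList.length : Int) - 1 - ↑l) = solve_alt s := by
  rw [loopA, dif_neg (by omega)]
  have hp := matched_pal s.toList l h inv
  have hb : (s.toList == s.toList.reverse) = true := beq_iff_eq.mpr hp
  simp [solve_alt, hb]

lemma loopA_main (s : String) (k : Nat) : ∀ l : Nat, s.toList.length ≤ 2 * l + k →
    (∀ j, j < l → s.toList[j]? = s.toList[s.toList.length - 1 - j]?) →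
    loopA s.toList ↑l ((s.toList.length : Int) - 1 - ↑l) = solve_alt s := by
  induction k with
  | zero =>
    intro l hk inv
    exact loopA_done s l (by omega) inv
  | succ k ih =>
    intro l hk inv
    by_cases hend : s.toList.length ≤ 2 * l + 1
    · exact loopA_done s l hend inv
    · have hn : 2 * l + 1 < s.toList.length := by omega
      have hl : l < s.toList.length := by omega
      have hrn : s.toList.length - 1 - l < s.toList.length := by omega
      rw [show (s.toList.length : Int) - 1 - (l : Int) = ((s.toList.length - 1 - l : Nat) : Int) from by omega]
      rw [loopA, dif_pos (show ((l : Nat) : Int) < ((s.toList.length - 1 - l : Nat) : Int) by omega)]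
      rw [PySem.List.pyGet?_natCast, PySem.List.pyGet?_natCast,
          List.getElem?_eq_getElem hl, List.getElem?_eq_getElem hrn]
      by_cases heq : s.toList[l]'hl = s.toList[s.toList.length - 1 - l]'hrn
      · have hbeq : (s.toList[l]'hl == s.toList[s.toList.length - 1 - l]'hrn) = true := beq_iff_eq.mpr heq
        simp only [hbeq, if_true]
        rw [show ((l : Nat) : Int) + 1 = ((l + 1 : Nat) : Int) from by push_cast; ring,
            show ((s.toList.length - 1 - l : Nat) : Int) - 1 = (s.toList.length : Int) - 1 - ((l + 1 : Nat) : Int) from by omega]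
        apply ih (l + 1) (by omega)
        intro j hj
        by_cases hjl : j < l
        · exact inv j hjl
        · have hjeq : j = l := by omega
          subst hjeq
          rw [List.getElem?_eq_getElem hl, List.getElem?_eq_getElem hrn, heq]
      · have hbeq : (s.toList[l]'hl == s.toList[s.toList.length - 1 - l]'hrn) = false := beq_eq_false_iff_ne.mpr heq
        simp only [hbeq, Bool.false_eq_true, if_false]
        have hner : s.toList ≠ s.toList.reverse := by
          intro h
          apply heq
          have h0 : s.toList[l]? = s.toList.reverse[l]? := by rw [← h]
          rw [List.getElem?_reverse hl] at h0
          exact getElem?_inv_get s.toList h0 hl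
        have hb2 : (s.toList == s.toList.reverse) = false := beq_eq_false_iff_ne.mpr hner
        simp only [solve_alt, hb2, Bool.false_eq_true, if_false, sliceDel, isPalA_eq]
        rw [key_cond s.toList l hn inv heq]

-- ===== VERDICT =====
theorem solve_spec : Claim_equal_solve := by
  unfold Claim_equal_solve Spec_solve
  intro s _
  rw [solve, show (0 : Int) = ((0 : Nat) : Int) from rfl,
      show (s.toList.length : Int) - 1 = (s.toList.length : Int) - 1 - ((0 : Nat) : Int) from by omega]
  exact loopA_main s s.toList.length 0 (by omega) (by omega)
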